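-- pv_equiv track=rewrite | github.com/Ceziy01/spo-course-work-back | app/services/search_service.py | build_brand_dict
-- ===== SOURCE A (Python) =====
-- from collections import Counter
--
-- def build_brand_dict(goods):
--     candidates = []
--
--     for item in goods:
--         first_word = item["name"].split()[0].lower()
--         candidates.append(first_word)
--
--     counter = Counter(candidates)
--
--     brands = set()
--
--     for brand, count in counter.items():
--         if count >= 1:
--             brands.add(brand)
--
--     return brands
-- ===== SOURCE B (Python) =====
-- def build_brand_dict(goods):
--     return {item["name"].split()[0].lower() for item in goods}
-- ===== Notes on version B (the rewrite author's own statement) =====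
-- stated objective: simpler
-- what changed: Drops the Counter frequency table and the separate count>=1 filter pass entirely; collects the lowercased first words straight into a set in one comprehension.
import Mathlib
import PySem

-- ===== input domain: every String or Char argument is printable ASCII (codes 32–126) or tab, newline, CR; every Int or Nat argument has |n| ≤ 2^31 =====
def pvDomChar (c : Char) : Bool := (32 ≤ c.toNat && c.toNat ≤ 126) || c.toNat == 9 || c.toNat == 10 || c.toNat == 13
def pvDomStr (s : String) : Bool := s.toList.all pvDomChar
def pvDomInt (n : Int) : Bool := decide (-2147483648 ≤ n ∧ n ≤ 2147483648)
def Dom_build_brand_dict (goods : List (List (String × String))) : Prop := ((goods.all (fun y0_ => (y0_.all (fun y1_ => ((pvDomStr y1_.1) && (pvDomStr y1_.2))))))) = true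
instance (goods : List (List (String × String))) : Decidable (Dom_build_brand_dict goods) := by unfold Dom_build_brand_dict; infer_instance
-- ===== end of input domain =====

-- B drops the Counter table and its count>=1 filter pass, collecting first words straight into a set (same cost, simpler).
-- Both programs return a Python set; this file compares the ports' distinct-element lists in first-occurrence order.

-- ===== PORT A =====
-- item["name"].split()[0].lower(); total via getD/pyGetD, exact under Pre_ (name present, split nonempty)
def pvFirstWordA (item : List (String × String)) : String :=
  PySem.Str.lower (PySem.List.pyGetD (PySem.Str.split₀ (((PySem.Dict.mk item).get? "name").getD "")) 0 "")

def build_brand_dict (goods : List (List (String × String))) : List String :=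
  let candidates := goods.foldl (fun acc item => acc ++ [pvFirstWordA item]) []
  let counter := PySem.Dict.counter candidates
  counter.items.foldl (fun brands kv => if kv.2 ≥ 1 then PySem.Set.add brands kv.1 else brands)
    PySem.Set.empty

-- ===== PORT B =====
def build_brand_dict_alt (goods : List (List (String × String))) : List String :=
  PySem.Set.ofList (goods.map (fun item =>
    PySem.Str.lower (PySem.List.pyGetD (PySem.Str.split₀ (((PySem.Dict.mk item).get? "name").getD "")) 0 "")))

-- ===== PRECONDITION & SPEC =====
-- Pre_ excludes exactly the inputs where A raises: an item without a "name" key (KeyError)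
-- or whose name has no words, i.e. split() is empty (IndexError).
def Pre_build_brand_dict (goods : List (List (String × String))) : Prop :=
  (goods.all (fun item =>
    match (PySem.Dict.mk item).get? "name" with
    | some s => !(PySem.Str.split₀ s).isEmpty
    | none => false)) = true
instance (goods : List (List (String × String))) : Decidable (Pre_build_brand_dict goods) := by
  unfold Pre_build_brand_dict; infer_instance

def pvWitness_build_brand_dict : (List (List (String × String))) :=
  [[("name", "Apple iPhone")], [("name", "apple Watch"), ("x", "y")]]

def Spec_build_brand_dict (goods : List (List (String × String))) (out : List String) : Prop := out = build_brand_dict_alt goods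
instance (goods : List (List (String × String))) (out : List String) : Decidable (Spec_build_brand_dict goods out) := by unfold Spec_build_brand_dict; infer_instance

-- ===== CLAIM (what is proved, stated in full; the proofs are below) =====
def Claim_equal_build_brand_dict : Prop := ∀ (goods : List (List (String × String))), Dom_build_brand_dict goods → Pre_build_brand_dict goods → Spec_build_brand_dict goods (build_brand_dict goods)

-- ===== LEMMAS AND PROOFS =====

-- folding the count>=1 filter over Counter(c).items adds every key, since every key occurs in c
theorem pv_filter_fold (c : List String) :
    ((PySem.Dict.counter c).items.foldl
      (fun brands kv => if kv.2 ≥ 1 then PySem.Set.add brands kv.1 else brands)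
      PySem.Set.empty) = PySem.Set.ofList c := by
  rw [PySem.Dict.items_counter]
  have h : ∀ (ks : List String) (acc : PySem.Set String),
      (∀ k ∈ ks, k ∈ c) →
      ((ks.map (fun k => (k, (c.count k : Int)))).foldl
        (fun brands kv => if kv.2 ≥ 1 then PySem.Set.add brands kv.1 else brands) acc)
        = ks.foldl PySem.Set.add acc := by
    intro ks
    induction ks with
    | nil => intro acc _; rfl
    | cons k ks ih =>
      intro acc hmem
      have hk : k ∈ c := hmem k (by simp)
      have hc : (1 : Int) ≤ (c.count k : Int) := by
        exact_mod_cast List.count_pos_iff.mpr hk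
      simp only [List.map_cons, List.foldl_cons]
      rw [if_pos hc]
      exact ih _ (fun x hx => hmem x (by simp [hx]))
  rw [h _ _ (fun k hk => (PySem.Set.mem_ofList c k).mp hk)]
  exact PySem.Set.ofList_ofList c

theorem build_brand_dict_eq (goods : List (List (String × String))) :
    build_brand_dict goods = build_brand_dict_alt goods := by
  unfold build_brand_dict build_brand_dict_alt
  rw [PySem.List.foldl_append_singleton_eq_map, List.nil_append, pv_filter_fold]
  rfl

-- ===== VERDICT (by name: the statement is the Claim_ definition above) =====
theorem build_brand_dict_spec : Claim_equal_build_brand_dict := by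
  intro goods _ _
  exact build_brand_dict_eq goods
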